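-- pv_equiv track=rewrite | github.com/JoonHyeok-hozy-Kim/algorithm_study | BaekJoon/Review/Rev_221025/Sol_01_Week3_1285_failed.py | one_loop_solution
-- ===== SOURCE A (Python) =====
-- def flip_row(C, r_idx):
--     original = C[r_idx]
--     start_with_tail = False
--     if original < 2 << len(C):
--         original += 2 << len(C)
--         start_with_tail = True
--     flipped = ~ original
--     if start_with_tail:
--         flipped += 2 << len(C)
--     C[r_idx] = flipped
--
-- def flip_col(C, c_idx):
--     for i in range(len(C)):
--         original = C[i]
--         temp = original >> (len(C) - c_idx - 1)
--         if temp % 2 == 1: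
--             C[i] -= 1 << (len(C) - c_idx - 1)
--         else:
--             C[i] += 1 << (len(C) - c_idx - 1)
--
-- def tail_cnt(C):
--     result = 0
--     for i in range(len(C)):
--         line = C[i]
--         for j in range(len(C)):
--             if line % 2 == 0:
--                 result += 1
--             line //= 2
--     return result
--
-- def one_loop_solution(C):
--     original_tail_num = tail_cnt(C)
--     for i in range(len(C)):
--         flip_row(C, i)
--         new_tail_num = tail_cnt(C)
--         if original_tail_num < new_tail_num:
--             flip_row(C, i)
--         else:
--             original_tail_num = new_tail_num
--
--     for j in range(len(C)):
--         flip_col(C, j)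
--         new_tail_num = tail_cnt(C)
--         if original_tail_num < new_tail_num:
--             flip_col(C, j)
--         else:
--             original_tail_num = new_tail_num
--
--     return original_tail_num
-- ===== SOURCE B (Python) =====
-- def one_loop_solution(C):
--     # Does not mutate C (A does); equivalence is about the return value.
--     n = len(C)
--     rows = []
--     for c in C:
--         z = sum(1 for k in range(n) if (c >> k) % 2 == 0)
--         rows.append(~c if n - z <= z else c)
--     total = 0
--     for j in range(n):
--         k = n - j - 1
--         c0 = sum(1 for r in rows if (r >> k) % 2 == 0)
--         total += min(c0, n - c0)
--     return total
-- ===== Notes on version B (the rewrite author's own statement) =====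
-- stated objective: faster
-- what changed: B drops the full O(n^2) board recount after every candidate flip: it decides each row flip from that row's own zero-bit count and then computes each column's contribution in one pass as min(c0, n-c0), since a column flip only changes that column's count.
import Mathlib
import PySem

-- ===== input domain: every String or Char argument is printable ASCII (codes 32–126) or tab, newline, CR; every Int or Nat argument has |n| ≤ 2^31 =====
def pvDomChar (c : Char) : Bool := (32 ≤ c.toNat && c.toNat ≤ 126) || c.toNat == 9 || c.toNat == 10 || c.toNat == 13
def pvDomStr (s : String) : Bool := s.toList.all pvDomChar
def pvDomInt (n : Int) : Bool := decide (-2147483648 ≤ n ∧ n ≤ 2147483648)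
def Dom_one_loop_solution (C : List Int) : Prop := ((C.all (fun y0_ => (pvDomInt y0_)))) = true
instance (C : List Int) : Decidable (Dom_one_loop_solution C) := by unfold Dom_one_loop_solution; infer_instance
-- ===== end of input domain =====

-- B replaces A's recount-after-every-flip greedy by one zero-count per row and one per column;
-- A mutates its argument in place, B does not — the equivalence claim is about the return value.

-- ===== PORT A =====
-- Python `~x` is Int.not, `x >> k` is `>>>`, `x << k` is `<<<` (exact on Int, also negatives);
-- loop indices come from range(len(C)) so they are in-range Nats and C[i] is ported as getD i 0.
def flip_row (C : List Int) (r_idx : Nat) : List Int :=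
  let original := C.getD r_idx 0
  let p : Int × Bool :=
    if original < (2:Int) <<< C.length then (original + (2:Int) <<< C.length, true)
    else (original, false)
  let flipped := Int.not p.1
  let flipped := if p.2 then flipped + (2:Int) <<< C.length else flipped
  C.set r_idx flipped

def flip_col (C : List Int) (c_idx : Nat) : List Int :=
  (List.range C.length).foldl (fun acc i =>
    let original := acc.getD i 0
    let temp := original >>> (C.length - c_idx - 1)
    if PySem.Int.mod temp 2 == 1 then
      acc.set i (original - (1:Int) <<< (C.length - c_idx - 1))
    else
      acc.set i (original + (1:Int) <<< (C.length - c_idx - 1))) C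

def tail_cnt (C : List Int) : Int :=
  (List.range C.length).foldl (fun result i =>
    (((List.range C.length).foldl (fun (p : Int × Int) _ =>
        (if PySem.Int.mod p.2 2 == 0 then p.1 + 1 else p.1, PySem.Int.floordiv p.2 2))
      (result, C.getD i 0)).1)) 0

def one_loop_solution (C : List Int) : Int :=
  ((List.range C.length).foldl (fun (s : List Int × Int) j =>
    let C' := flip_col s.1 j
    let new_tail := tail_cnt C'
    if s.2 < new_tail then (flip_col C' j, s.2) else (C', new_tail))
   ((List.range C.length).foldl (fun (s : List Int × Int) i =>
    let C' := flip_row s.1 i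
    let new_tail := tail_cnt C'
    if s.2 < new_tail then (flip_row C' i, s.2) else (C', new_tail))
   (C, tail_cnt C))).2

-- ===== PORT B =====
def one_loop_solution_alt (C : List Int) : Int :=
  let n := C.length
  let rows := C.map (fun c : Int =>
    let z : Int := ((List.range n).filter (fun k : Nat => PySem.Int.mod (c >>> k) 2 == 0)).length
    if (n : Int) - z ≤ z then Int.not c else c)
  (List.range n).foldl (fun total j =>
    let k := n - j - 1
    let c0 : Int := (rows.filter (fun r : Int => PySem.Int.mod (r >>> k) 2 == 0)).length
    total + min c0 ((n : Int) - c0)) 0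

-- ===== PRECONDITION & SPEC =====
def Spec_one_loop_solution (C : List Int) (out : Int) : Prop := out = one_loop_solution_alt C
instance (C : List Int) (out : Int) : Decidable (Spec_one_loop_solution C out) := by unfold Spec_one_loop_solution; infer_instance

-- ===== CLAIM (what is proved, stated in full; the proofs are below) =====
def Claim_equal_one_loop_solution : Prop := ∀ (C : List Int), Dom_one_loop_solution C → Spec_one_loop_solution C (one_loop_solution C)

-- ===== LEMMAS AND PROOFS =====

-- bit k of x in two's complement (Python's (x >> k) % 2 == 1)
def bitp : Int → Nat → Bool
  | x, 0 => x % 2 == 1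
  | x, k+1 => bitp (x / 2) k

-- number of zero bits among the low m bits of x (what A's inner tail_cnt loop counts per row)
def zcnt : Nat → Int → Int
  | 0, _ => 0
  | m+1, x => (if x % 2 = 0 then (1:Int) else 0) + zcnt m (x / 2)

def rowsum (n : Nat) (R : List Int) : Int := (R.map (zcnt n)).sum

def colZ (R : List Int) (k : Nat) : Int := (R.countP (fun r => !bitp r k) : Int)

def gRow (n : Nat) (c : Int) : Int :=
  if (n : Int) - zcnt n c ≤ zcnt n c then -c - 1 else c

def flipk (k : Nat) (x : Int) : Int := if bitp x k then x - 2^k else x + 2^k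

theorem int_not_eq (x : Int) : Int.not x = -x - 1 := by
  cases x <;> simp [Int.not] <;> omega

theorem bitp_div_pow (k : Nat) (x : Int) : bitp x k = ((x / 2^k) % 2 == 1) := by
  induction k generalizing x with
  | zero => simp [bitp]
  | succ k ih =>
    show bitp (x/2) k = _
    rw [ih, Int.ediv_ediv_of_nonneg (by norm_num : (0:Int) ≤ 2)]
    norm_num [pow_succ, mul_comm]

theorem mod2_shift_eq_one (x : Int) (k : Nat) :
    (PySem.Int.mod (x >>> k) 2 == 1) = bitp x k := by
  rw [PySem.Int.mod_eq_emod_of_pos (by norm_num), Int.shiftRight_eq_div_pow, bitp_div_pow]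
  norm_num

theorem mod2_shift_eq_zero (x : Int) (k : Nat) :
    (PySem.Int.mod (x >>> k) 2 == 0) = (!bitp x k) := by
  rw [PySem.Int.mod_eq_emod_of_pos (by norm_num), Int.shiftRight_eq_div_pow, bitp_div_pow]
  push_cast
  rcases Int.emod_two_eq (x / (2:Int)^k) with h | h <;> simp [h]

theorem zcnt_not (m : Nat) (x : Int) : zcnt m (-x - 1) = m - zcnt m x := by
  induction m generalizing x with
  | zero => simp [zcnt]
  | succ m ih =>
    have h2 : (-x - 1) / 2 = -(x/2) - 1 := by omega
    have h3 : (-x - 1) % 2 = 1 - x % 2 := by omega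
    simp only [zcnt, h2, h3, ih]
    have := Int.emod_two_eq x
    push_cast
    rcases this with h | h <;> simp [h] <;> omega

theorem zcnt_eq_sum (m : Nat) (x : Int) :
    zcnt m x = ((List.range m).map (fun k => if bitp x k then (0:Int) else 1)).sum := by
  induction m generalizing x with
  | zero => simp [zcnt]
  | succ m ih =>
    rw [List.range_succ_eq_map]
    simp only [List.map_cons, List.map_map, List.sum_cons]
    show zcnt (m+1) x = _
    simp only [zcnt, ih (x/2)]
    rw [show ((fun k => if bitp x k then (0:Int) else 1) ∘ Nat.succ) =
        (fun k => if bitp (x/2) k then (0:Int) else 1) from rfl]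
    rcases Int.emod_two_eq x with h | h <;> simp [bitp, h]

theorem bitp_flip (k : Nat) : ∀ (m : Nat) (x : Int),
    bitp (flipk k x) m = if m = k then !bitp x k else bitp x m := by
  induction k with
  | zero =>
    intro m x
    cases m with
    | zero =>
      rw [if_pos rfl]
      rcases Int.emod_two_eq x with h | h
      · have hb : bitp x 0 = false := by simp [bitp, h]
        have hf : flipk 0 x = x + 1 := by simp [flipk, hb]
        have h1 : (x + 1) % 2 = 1 := by omega
        rw [hf, hb]
        simp [bitp, h1]
      · have hb : bitp x 0 = true := by simp [bitp, h]
        have hf : flipk 0 x = x - 1 := by simp [flipk, hb]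
        have h1 : (x - 1) % 2 = 0 := by omega
        rw [hf, hb]
        simp [bitp, h1]
    | succ m =>
      rw [if_neg (by omega)]
      rcases Int.emod_two_eq x with h | h
      · have hb : bitp x 0 = false := by simp [bitp, h]
        have hf : flipk 0 x = x + 1 := by simp [flipk, hb]
        have h2 : (x + 1) / 2 = x / 2 := by omega
        rw [hf]
        show bitp ((x+1)/2) m = bitp (x/2) m
        rw [h2]
      · have hb : bitp x 0 = true := by simp [bitp, h]
        have hf : flipk 0 x = x - 1 := by simp [flipk, hb]
        have h2 : (x - 1) / 2 = x / 2 := by omega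
        rw [hf]
        show bitp ((x-1)/2) m = bitp (x/2) m
        rw [h2]
  | succ k ih =>
    intro m x
    have hsplit : flipk (k+1) x = if bitp (x/2) k then x - 2^(k+1) else x + 2^(k+1) := rfl
    have hsub : (x - 2^(k+1)) / 2 = x/2 - 2^k := by
      have h : x - 2^(k+1) = x + (-(2^k)) * 2 := by rw [pow_succ]; ring
      rw [h, Int.add_mul_ediv_right _ _ (by norm_num : (2:Int) ≠ 0)]; ring
    have hadd : (x + 2^(k+1)) / 2 = x/2 + 2^k := by
      have h : x + 2^(k+1) = x + (2^k) * 2 := by rw [pow_succ]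
      rw [h, Int.add_mul_ediv_right _ _ (by norm_num : (2:Int) ≠ 0)]
    have hmod_sub : (x - 2^(k+1)) % 2 = x % 2 := by
      have h : x - 2^(k+1) = x + (-(2^k)) * 2 := by rw [pow_succ]; ring
      rw [h]; omega
    have hmod_add : (x + 2^(k+1)) % 2 = x % 2 := by
      have h : x + 2^(k+1) = x + (2^k) * 2 := by rw [pow_succ]
      rw [h]; omega
    cases m with
    | zero =>
      rw [if_neg (by omega), hsplit]
      split_ifs with h
      · show ((x - 2^(k+1)) % 2 == 1) = (x % 2 == 1)
        rw [hmod_sub]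
      · show ((x + 2^(k+1)) % 2 == 1) = (x % 2 == 1)
        rw [hmod_add]
    | succ m =>
      have hstep : bitp (flipk (k+1) x) (m+1) = bitp (flipk k (x/2)) m := by
        rw [hsplit]
        split_ifs with h
        · show bitp ((x - 2^(k+1))/2) m = _
          rw [hsub]; simp [flipk, h]
        · show bitp ((x + 2^(k+1))/2) m = _
          rw [hadd]; simp [flipk, h]
      rw [hstep, ih m (x/2)]
      by_cases hmk : m = k
      · subst hmk; simp [bitp]
      · rw [if_neg hmk, if_neg (by omega)]
        rfl

theorem flipk_flipk (k : Nat) (x : Int) : flipk k (flipk k x) = x := by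
  have h := bitp_flip k k x
  rw [if_pos rfl] at h
  by_cases hb : bitp x k
  · have h1 : flipk k x = x - 2^k := by rw [flipk, if_pos hb]
    have h2 : bitp (x - 2^k) k = false := by rw [← h1, h, hb]; rfl
    rw [h1, flipk, h2]
    simp
  · have h1 : flipk k x = x + 2^k := by rw [flipk, if_neg hb]
    have h2 : bitp (x + 2^k) k = true := by
      rw [← h1, h]
      simp [hb]
    rw [h1, flipk, h2]
    simp

-- fold over range(len xs) reading xs[i] is a fold over xs
theorem foldl_range_getD {α β : Type} (d : α) (f : β → α → β) :
    ∀ (xs : List α) (init : β),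
    (List.range xs.length).foldl (fun a i => f a (xs.getD i d)) init = xs.foldl f init := by
  intro xs
  induction xs with
  | nil => intro init; simp
  | cons x xs ih =>
    intro init
    rw [show (x :: xs).length = xs.length + 1 from rfl, List.range_succ_eq_map]
    simp only [List.foldl_cons, List.foldl_map]
    exact ih (f init x)

theorem foldl_add_map {α : Type} (h : α → Int) :
    ∀ (xs : List α) (a0 : Int), xs.foldl (fun a r => a + h r) a0 = a0 + (xs.map h).sum := by
  intro xs
  induction xs with
  | nil => simp
  | cons x xs ih => intro a0; simp [ih]; ring

theorem inner_tail (l : List Nat) : ∀ (res line : Int),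
    (l.foldl (fun (p : Int × Int) _ =>
        (if PySem.Int.mod p.2 2 == 0 then p.1 + 1 else p.1, PySem.Int.floordiv p.2 2))
      (res, line)).1 = res + zcnt l.length line := by
  induction l with
  | nil => intro res line; simp [zcnt]
  | cons a l ih =>
    intro res line
    simp only [List.foldl_cons]
    rw [ih]
    rw [PySem.Int.mod_eq_emod_of_pos (by norm_num), PySem.Int.floordiv_eq_ediv_of_pos (by norm_num)]
    show _ = res + zcnt (l.length + 1) line
    simp only [zcnt]
    rcases Int.emod_two_eq line with h | h <;> simp [h] <;> ring

theorem tail_cnt_eq (C : List Int) : tail_cnt C = rowsum C.length C := by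
  unfold tail_cnt
  have hcong : (fun (result : Int) (i : Nat) =>
      (((List.range C.length).foldl (fun (p : Int × Int) _ =>
        (if PySem.Int.mod p.2 2 == 0 then p.1 + 1 else p.1, PySem.Int.floordiv p.2 2))
      (result, C.getD i 0)).1)) = fun result i => result + zcnt C.length (C.getD i 0) := by
    funext result i
    rw [inner_tail]
    simp
  rw [hcong]
  rw [foldl_range_getD 0 (fun a r => a + zcnt C.length r) C 0]
  rw [foldl_add_map]
  simp [rowsum]

theorem flip_row_eq (C : List Int) (i : Nat) :
    flip_row C i = C.set i (-(C.getD i 0) - 1) := by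
  have key : ∀ (y M : Int),
      (if (if y < M then (y + M, true) else (y, false)).2
       then Int.not (if y < M then (y + M, true) else (y, false)).1 + M
       else Int.not (if y < M then (y + M, true) else (y, false)).1) = -y - 1 := by
    intro y M
    by_cases h : y < M
    · rw [if_pos h]
      show Int.not (y + M) + M = -y - 1
      rw [int_not_eq]; ring
    · rw [if_neg h]
      show Int.not y = -y - 1
      rw [int_not_eq]
  show C.set i (if (if C.getD i 0 < (2:Int) <<< C.length
        then (C.getD i 0 + (2:Int) <<< C.length, true) else (C.getD i 0, false)).2
       then Int.not (if C.getD i 0 < (2:Int) <<< C.length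
        then (C.getD i 0 + (2:Int) <<< C.length, true) else (C.getD i 0, false)).1 + (2:Int) <<< C.length
       else Int.not (if C.getD i 0 < (2:Int) <<< C.length
        then (C.getD i 0 + (2:Int) <<< C.length, true) else (C.getD i 0, false)).1) = _
  rw [key]

theorem rowsum_append_cons (n : Nat) (l l' : List Int) (v : Int) :
    rowsum n (l ++ v :: l') = rowsum n l + zcnt n v + rowsum n l' := by
  simp [rowsum]; ring

theorem set_len_append {α : Type} (a v : α) : ∀ (l l' : List α),
    (l ++ a :: l').set l.length v = l ++ v :: l' := by
  intro l l'
  induction l with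
  | nil => rfl
  | cons x xs ih => simp [List.set, ih]

theorem getD_len_append {α : Type} (d a : α) : ∀ (l l' : List α),
    (l ++ a :: l').getD l.length d = a := by
  intro l l'
  induction l with
  | nil => rfl
  | cons x xs ih => simpa using ih

theorem countP_cons_int {α : Type} (p : α → Bool) (x : α) (xs : List α) :
    ((x :: xs).countP p : Int) = (if p x then (1:Int) else 0) + (xs.countP p : Int) := by
  rw [List.countP_cons]
  by_cases h : p x
  · simp only [h, if_pos rfl, if_true]
    push_cast
    ring
  · simp [h]

theorem sum_map_add {α : Type} (f g : α → Int) : ∀ (l : List α),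
    (l.map (fun a => f a + g a)).sum = (l.map f).sum + (l.map g).sum := by
  intro l
  induction l with
  | nil => simp
  | cons x xs ih => simp [ih]; ring

theorem rowsum_eq_sum_colZ (n : Nat) : ∀ (R : List Int),
    rowsum n R = ((List.range n).map (colZ R)).sum := by
  intro R
  induction R with
  | nil =>
    simp only [rowsum, List.map_nil, List.sum_nil]
    have : (List.range n).map (colZ []) = (List.range n).map (fun _ => (0:Int)) := by
      apply List.map_congr_left; intro k _; simp [colZ]
    rw [this]
    simp [List.map_const']
  | cons r R ih =>
    have hcol : (List.range n).map (colZ (r :: R)) =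
        (List.range n).map (fun k => (if bitp r k then (0:Int) else 1) + colZ R k) := by
      apply List.map_congr_left
      intro k _
      rw [colZ, countP_cons_int]
      by_cases hb : bitp r k <;> simp [hb, colZ]
    rw [hcol, sum_map_add]
    simp only [rowsum, List.map_cons, List.sum_cons] at *
    rw [ih, zcnt_eq_sum]

theorem sum_range_reflect_int : ∀ (n : Nat) (f : Nat → Int),
    ((List.range n).map (fun j => f (n - 1 - j))).sum = ((List.range n).map f).sum := by
  intro n
  induction n with
  | zero => intro f; simp
  | succ n ih =>
    intro f
    have e1 : ∀ (g : Nat → Int),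
        ((List.range (n+1)).map g).sum = g 0 + ((List.range n).map (fun j => g (j+1))).sum := by
      intro g
      rw [List.range_succ_eq_map]
      simp [List.map_map, Function.comp_def]
    rw [e1, e1 f]
    have h1 : ((List.range n).map (fun j => (fun j => f (n + 1 - 1 - j)) (j+1))).sum =
        ((List.range n).map (fun j => f (n - 1 - j))).sum := by
      congr 1
      apply List.map_congr_left
      intro j _
      show f (n + 1 - 1 - (j+1)) = f (n - 1 - j)
      congr 1
      omega
    rw [h1, ih f]
    have h2 : f (n + 1 - 1 - 0) = f n := by congr 1
    rw [h2]
    have e2 : ((List.range (n+1)).map f).sum = ((List.range n).map f).sum + f n := by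
      rw [List.range_succ]; simp
    have := (e1 f).symm.trans e2
    linarith [this]

theorem colZ_map_flip_self (k : Nat) : ∀ (R : List Int),
    colZ (R.map (flipk k)) k = R.length - colZ R k := by
  intro R
  induction R with
  | nil => simp [colZ]
  | cons r R ih =>
    simp only [List.map_cons, colZ, countP_cons_int] at *
    rw [ih]
    have h := bitp_flip k k r
    rw [if_pos rfl] at h
    rw [h]
    push_cast
    by_cases hb : bitp r k <;> simp [hb] <;> ring

theorem colZ_map_flip_other (k k' : Nat) (hne : k' ≠ k) : ∀ (R : List Int),
    colZ (R.map (flipk k)) k' = colZ R k' := by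
  intro R
  induction R with
  | nil => simp [colZ]
  | cons r R ih =>
    simp only [List.map_cons, colZ, countP_cons_int] at *
    rw [ih]
    have h := bitp_flip k k' r
    rw [if_neg hne] at h
    rw [h]

theorem colZ_nonneg_le (R : List Int) (k : Nat) : 0 ≤ colZ R k ∧ colZ R k ≤ R.length := by
  constructor
  · simp [colZ]
  · simp only [colZ]
    exact_mod_cast List.countP_le_length

theorem sum_map_range_single_diff : ∀ (n : Nat) (j : Nat), j < n → ∀ (f f' : Nat → Int),
    (∀ i, i < n → i ≠ j → f' i = f i) →
    ((List.range n).map f').sum = ((List.range n).map f).sum + (f' j - f j) := by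
  intro n
  induction n with
  | zero => intro j hj; omega
  | succ n ih =>
    intro j hj f f' h
    rw [List.range_succ]
    simp only [List.map_append, List.sum_append, List.map_cons, List.map_nil,
      List.sum_cons, List.sum_nil]
    by_cases hjn : j = n
    · have hmap : (List.range n).map f' = (List.range n).map f := by
        apply List.map_congr_left
        intro i hi
        simp only [List.mem_range] at hi
        exact h i (by omega) (by omega)
      rw [hmap, hjn]
      ring
    · have hjlt : j < n := by omega
      rw [ih j hjlt f f' (fun i hi hij => h i (by omega) hij)]
      rw [h n (by omega) (fun he => hjn he.symm)]
      ring

-- the in-place column flip is a map over the rows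
theorem foldl_set_aux {α : Type} (h : α → α) (d : α) : ∀ (rest done : List α),
    (List.range' done.length rest.length).foldl
      (fun acc i => acc.set i (h (acc.getD i d))) (done ++ rest) = done ++ rest.map h := by
  intro rest
  induction rest with
  | nil => intro done; simp
  | cons x rest ih =>
    intro done
    rw [show (x :: rest).length = rest.length + 1 from rfl, List.range'_succ]
    simp only [List.foldl_cons]
    rw [getD_len_append, set_len_append]
    have hsh : done ++ h x :: rest = (done ++ [h x]) ++ rest := by simp
    have hl : done.length + 1 = ((done ++ [h x]) : List α).length := by simp
    rw [hsh, hl, ih (done ++ [h x])]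
    simp

theorem flip_col_eq (C : List Int) (j : Nat) :
    flip_col C j = C.map (flipk (C.length - j - 1)) := by
  unfold flip_col
  have hs : (1:Int) <<< (C.length - j - 1) = 2^(C.length - j - 1) := by
    simp [Int.shiftLeft_eq]
  have hbody : (fun (acc : List Int) (i : Nat) =>
      let original := acc.getD i 0
      let temp := original >>> (C.length - j - 1)
      if PySem.Int.mod temp 2 == 1 then
        acc.set i (original - (1:Int) <<< (C.length - j - 1))
      else
        acc.set i (original + (1:Int) <<< (C.length - j - 1)))
      = fun acc i => acc.set i (flipk (C.length - j - 1) (acc.getD i 0)) := by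
    funext acc i
    show (if PySem.Int.mod ((acc.getD i 0) >>> (C.length - j - 1)) 2 == 1 then _ else _) = _
    rw [mod2_shift_eq_one, hs]
    unfold flipk
    split_ifs <;> rfl
  rw [hbody]
  have := foldl_set_aux (flipk (C.length - j - 1)) 0 C []
  simpa [List.range_eq_range'] using this

theorem rowsum_map_flip (n : Nat) (k : Nat) (hk : k < n) (R : List Int) :
    rowsum n (R.map (flipk k)) = rowsum n R - colZ R k + ((R.length : Int) - colZ R k) := by
  rw [rowsum_eq_sum_colZ, rowsum_eq_sum_colZ]
  rw [sum_map_range_single_diff n k hk (colZ R) (colZ (R.map (flipk k)))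
    (fun i _ hij => colZ_map_flip_other k i hij R)]
  rw [colZ_map_flip_self]
  ring

-- the loop bodies of one_loop_solution, named for the proofs (defeq to the lambdas in the port)
def rowStep (s : List Int × Int) (i : Nat) : List Int × Int :=
  let C' := flip_row s.1 i
  let new_tail := tail_cnt C'
  if s.2 < new_tail then (flip_row C' i, s.2) else (C', new_tail)

def colStep (s : List Int × Int) (j : Nat) : List Int × Int :=
  let C' := flip_col s.1 j
  let new_tail := tail_cnt C'
  if s.2 < new_tail then (flip_col C' j, s.2) else (C', new_tail)

theorem rowStep_eq (s : List Int × Int) (i : Nat) :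
    rowStep s i = if s.2 < tail_cnt (flip_row s.1 i)
      then (flip_row (flip_row s.1 i) i, s.2)
      else (flip_row s.1 i, tail_cnt (flip_row s.1 i)) := rfl

theorem colStep_eq (s : List Int × Int) (j : Nat) :
    colStep s j = if s.2 < tail_cnt (flip_col s.1 j)
      then (flip_col (flip_col s.1 j) j, s.2)
      else (flip_col s.1 j, tail_cnt (flip_col s.1 j)) := rfl

theorem row_phase (C : List Int) : ∀ (t : Nat), t ≤ C.length →
    (List.range t).foldl rowStep (C, tail_cnt C)
    = ((C.take t).map (gRow C.length) ++ C.drop t,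
       rowsum C.length ((C.take t).map (gRow C.length) ++ C.drop t)) := by
  intro t
  induction t with
  | zero =>
    intro _
    simp [tail_cnt_eq]
  | succ t ih =>
    intro ht
    have htn : t < C.length := by omega
    rw [List.range_succ, List.foldl_append, ih (by omega)]
    simp only [List.foldl_cons, List.foldl_nil]
    rw [rowStep_eq]
    set n := C.length with hn
    set g := gRow n with hg
    set pre := (C.take t).map g with hpre
    have hprelen : pre.length = t := by
      rw [hpre, List.length_map, List.length_take]
      omega
    have hdrop : C.drop t = C[t] :: C.drop (t+1) := List.drop_eq_getElem_cons htn
    set x := C[t] with hx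
    have hR : pre ++ C.drop t = pre ++ x :: C.drop (t+1) := by rw [hdrop]
    have hget : (pre ++ x :: C.drop (t+1)).getD t 0 = x := by
      rw [← hprelen]; exact getD_len_append 0 x pre _
    have hset : ∀ v, (pre ++ x :: C.drop (t+1)).set t v = pre ++ v :: C.drop (t+1) := by
      intro v; rw [← hprelen]; exact set_len_append x v pre _
    have hflip : flip_row (pre ++ x :: C.drop (t+1)) t = pre ++ (-x-1) :: C.drop (t+1) := by
      rw [flip_row_eq, hget, hset]
    have hlen2 : (pre ++ (-x-1) :: C.drop (t+1)).length = n := by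
      simp [hprelen]
      omega
    set z := zcnt n x with hz
    have hold : rowsum n (pre ++ x :: C.drop (t+1)) = rowsum n pre + z + rowsum n (C.drop (t+1)) :=
      rowsum_append_cons n pre _ x
    have hnew : rowsum n (pre ++ (-x-1) :: C.drop (t+1)) =
        rowsum n pre + ((n:Int) - z) + rowsum n (C.drop (t+1)) := by
      rw [rowsum_append_cons, zcnt_not]
    have htc : tail_cnt (pre ++ (-x-1) :: C.drop (t+1)) =
        rowsum n pre + ((n:Int) - z) + rowsum n (C.drop (t+1)) := by
      rw [tail_cnt_eq, hlen2, hnew]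
    have htake : (C.take (t+1)).map g = pre ++ [g x] := by
      have h1 : C.take (t+1) = C.take t ++ [x] := by
        rw [List.take_add_one, List.getElem?_eq_getElem htn]
        rfl
      rw [h1, List.map_append, hpre]
      rfl
    rw [hR, hflip, htc, hold]
    by_cases hcase : z < (n:Int) - z
    · rw [if_pos (by omega)]
      have hgx : g x = x := by
        rw [hg, gRow, if_neg (by omega)]
      have hback : flip_row (pre ++ (-x-1) :: C.drop (t+1)) t = pre ++ x :: C.drop (t+1) := by
        rw [flip_row_eq, ← hprelen, getD_len_append, set_len_append]
        norm_num
      rw [hback, htake, hgx]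
      have hl : pre ++ [x] ++ C.drop (t+1) = pre ++ x :: C.drop (t+1) := by simp
      rw [hl, hold]
    · rw [if_neg (by omega)]
      have hgx : g x = -x-1 := by
        rw [hg, gRow, if_pos (by omega)]
      rw [htake, hgx]
      have hl : pre ++ [-x-1] ++ C.drop (t+1) = pre ++ (-x-1) :: C.drop (t+1) := by simp
      rw [hl, hnew]

theorem col_phase (n : Nat) (R0 : List Int) (hlen : R0.length = n) : ∀ (t : Nat), t ≤ n →
    ((List.range t).foldl colStep (R0, rowsum n R0)).1.length = n ∧
    ((List.range t).foldl colStep (R0, rowsum n R0)).2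
      = rowsum n ((List.range t).foldl colStep (R0, rowsum n R0)).1 ∧
    (∀ j, j < n → t ≤ j →
      colZ ((List.range t).foldl colStep (R0, rowsum n R0)).1 (n-1-j) = colZ R0 (n-1-j)) ∧
    (∀ j, j < t →
      colZ ((List.range t).foldl colStep (R0, rowsum n R0)).1 (n-1-j)
      = min (colZ R0 (n-1-j)) ((n:Int) - colZ R0 (n-1-j))) := by
  intro t
  induction t with
  | zero =>
    intro _
    refine ⟨hlen, by simp, fun j _ _ => rfl, fun j hj => by omega⟩
  | succ t ih =>
    intro ht
    obtain ⟨ih1, ih2, ih3, ih4⟩ := ih (by omega)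
    rw [List.range_succ, List.foldl_append]
    simp only [List.foldl_cons, List.foldl_nil]
    set s := (List.range t).foldl colStep (R0, rowsum n R0) with hs
    rw [colStep_eq]
    set k := n - 1 - t with hk
    have htn : t < n := by omega
    have hkn : k < n := by omega
    have hflip1 : flip_col s.1 t = s.1.map (flipk k) := by
      rw [flip_col_eq, ih1, show n - t - 1 = k by omega]
    set c := colZ s.1 k with hc
    have hcb := colZ_nonneg_le s.1 k
    rw [ih1] at hcb
    have hc0 : c = colZ R0 k := ih3 t htn (le_refl t)
    have hmaplen : (s.1.map (flipk k)).length = n := by rw [List.length_map, ih1]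
    have htc : tail_cnt (s.1.map (flipk k)) = s.2 - c + ((n:Int) - c) := by
      rw [tail_cnt_eq, hmaplen, rowsum_map_flip n k hkn, ih1, ← ih2, ← hc]
    rw [hflip1, htc]
    by_cases hcase : c < (n:Int) - c
    · rw [if_pos (by omega)]
      have hback : flip_col (s.1.map (flipk k)) t = s.1 := by
        rw [flip_col_eq, hmaplen, show n - t - 1 = k by omega, List.map_map]
        have hmm : s.1.map (flipk k ∘ flipk k) = s.1.map id :=
          List.map_congr_left (fun y _ => flipk_flipk k y)
        rw [hmm, List.map_id]
      rw [hback]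
      refine ⟨ih1, ih2, fun j hj hj2 => ih3 j hj (by omega), fun j hj => ?_⟩
      by_cases hjt : j = t
      · subst hjt
        show colZ s.1 (n-1-j) = _
        rw [← hk, ← hc, hc0]
        exact (min_eq_left (by omega)).symm
      · exact ih4 j (by omega)
    · rw [if_neg (by omega)]
      refine ⟨hmaplen, ?_, fun j hj hj2 => ?_, fun j hj => ?_⟩
      · show s.2 - c + ((n:Int) - c) = rowsum n (s.1.map (flipk k))
        rw [rowsum_map_flip n k hkn, ih1, ← ih2, ← hc]
      · have hne : n - 1 - j ≠ k := by omega
        show colZ (s.1.map (flipk k)) (n-1-j) = colZ R0 (n-1-j)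
        rw [colZ_map_flip_other k (n-1-j) hne]
        exact ih3 j hj (by omega)
      · by_cases hjt : j = t
        · subst hjt
          show colZ (s.1.map (flipk k)) (n-1-j) = _
          rw [← hk, colZ_map_flip_self, ih1, ← hc, hc0]
          exact (min_eq_right (by omega)).symm
        · have hne : n - 1 - j ≠ k := by omega
          show colZ (s.1.map (flipk k)) (n-1-j) = _
          rw [colZ_map_flip_other k (n-1-j) hne]
          rw [ih4 j (by omega)]

theorem countP_int_eq_sum {α : Type} (p : α → Bool) : ∀ (l : List α),
    ((l.countP p : Nat) : Int) = (l.map (fun a => if p a then (1:Int) else 0)).sum := by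
  intro l
  induction l with
  | nil => simp
  | cons x xs ih =>
    rw [countP_cons_int, ih]
    simp

theorem zcnt_eq_countP (n : Nat) (c : Int) :
    zcnt n c = (((List.range n).countP (fun k => !bitp c k) : Nat) : Int) := by
  rw [zcnt_eq_sum, countP_int_eq_sum]
  congr 1
  apply List.map_congr_left
  intro k _
  by_cases hb : bitp c k <;> simp [hb]

theorem length_filter_int {α : Type} (p : α → Bool) (l : List α) :
    ((l.filter p).length : Int) = ((l.countP p : Nat) : Int) := by
  congr 1
  exact List.countP_eq_length_filter.symm

theorem alt_eq (C : List Int) :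
    one_loop_solution_alt C =
      ((List.range C.length).map (fun j =>
        min (colZ (C.map (gRow C.length)) (C.length - 1 - j))
            ((C.length : Int) - colZ (C.map (gRow C.length)) (C.length - 1 - j)))).sum := by
  have hrows : C.map (fun c : Int =>
      let z : Int := ((List.range C.length).filter (fun k : Nat => PySem.Int.mod (c >>> k) 2 == 0)).length
      if (C.length : Int) - z ≤ z then Int.not c else c) = C.map (gRow C.length) := by
    apply List.map_congr_left
    intro c _
    have hf : (fun k : Nat => PySem.Int.mod (c >>> k) 2 == 0) = (fun k : Nat => !bitp c k) := by
      funext k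
      exact mod2_shift_eq_zero c k
    have hz : (((List.range C.length).filter
        (fun k : Nat => PySem.Int.mod (c >>> k) 2 == 0)).length : Int) = zcnt C.length c := by
      rw [length_filter_int, zcnt_eq_countP, hf]
    show (if (C.length : Int) - (((List.range C.length).filter
        (fun k : Nat => PySem.Int.mod (c >>> k) 2 == 0)).length : Int) ≤ (((List.range C.length).filter
        (fun k : Nat => PySem.Int.mod (c >>> k) 2 == 0)).length : Int) then Int.not c else c) = _
    rw [hz, gRow, int_not_eq]
  show (List.range C.length).foldl (fun total j =>
      let k := C.length - j - 1
      let c0 : Int := (((C.map (fun c : Int =>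
        let z : Int := ((List.range C.length).filter (fun k : Nat => PySem.Int.mod (c >>> k) 2 == 0)).length
        if (C.length : Int) - z ≤ z then Int.not c else c)).filter
          (fun r : Int => PySem.Int.mod (r >>> k) 2 == 0)).length)
      total + min c0 ((C.length : Int) - c0)) 0 = _
  rw [hrows]
  have hcong := PySem.List.foldl_congr_mem
    (l := List.range C.length) (init := (0:Int))
    (f := fun (total : Int) (j : Nat) =>
      let k := C.length - j - 1
      let c0 : Int := (((C.map (gRow C.length)).filter
        (fun r : Int => PySem.Int.mod (r >>> k) 2 == 0)).length)
      total + min c0 ((C.length : Int) - c0))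
    (g := fun (total : Int) (j : Nat) => total +
      min (colZ (C.map (gRow C.length)) (C.length - 1 - j))
          ((C.length:Int) - colZ (C.map (gRow C.length)) (C.length - 1 - j)))
    (by
      intro total j _
      show total + min ((((C.map (gRow C.length)).filter
          (fun r : Int => PySem.Int.mod (r >>> (C.length - j - 1)) 2 == 0)).length : Int))
          ((C.length : Int) - (((C.map (gRow C.length)).filter
          (fun r : Int => PySem.Int.mod (r >>> (C.length - j - 1)) 2 == 0)).length : Int)) = _
      have hc0 : (((C.map (gRow C.length)).filter
          (fun r : Int => PySem.Int.mod (r >>> (C.length - j - 1)) 2 == 0)).length : Int)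
          = colZ (C.map (gRow C.length)) (C.length - 1 - j) := by
        rw [length_filter_int, show C.length - j - 1 = C.length - 1 - j by omega]
        have hf2 : (fun r : Int => PySem.Int.mod (r >>> (C.length - 1 - j)) 2 == 0)
            = (fun r : Int => !bitp r (C.length - 1 - j)) := by
          funext r
          exact mod2_shift_eq_zero r (C.length - 1 - j)
        rw [hf2, colZ]
      rw [hc0])
  rw [hcong]
  rw [foldl_add_map (fun j =>
    min (colZ (C.map (gRow C.length)) (C.length - 1 - j))
        ((C.length:Int) - colZ (C.map (gRow C.length)) (C.length - 1 - j)))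
    (List.range C.length) 0]
  simp

-- ===== VERDICT (by name: the statement is the Claim_ definition above) =====
theorem one_loop_solution_spec : Claim_equal_one_loop_solution := by
  unfold Claim_equal_one_loop_solution
  intro C _
  unfold Spec_one_loop_solution
  have hA : one_loop_solution C =
      ((List.range C.length).foldl colStep
        ((List.range C.length).foldl rowStep (C, tail_cnt C))).2 := rfl
  rw [hA, row_phase C C.length (le_refl _)]
  have h1 : C.take C.length = C := List.take_length
  have h2 : C.drop C.length = [] := List.drop_length
  rw [h1, h2, List.append_nil]
  have hlen : (C.map (gRow C.length)).length = C.length := List.length_map ..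
  obtain ⟨g1, g2, _, g4⟩ := col_phase C.length (C.map (gRow C.length)) hlen C.length (le_refl _)
  rw [g2, rowsum_eq_sum_colZ]
  rw [← sum_range_reflect_int C.length]
  rw [alt_eq]
  congr 1
  apply List.map_congr_left
  intro j hj
  have hjn : j < C.length := by simpa using hj
  rw [g4 j hjn]
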